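-- pv_equiv track=rewrite | github.com/ryanjmccall/swe-cheatsheet | swe-cheatsheet/algorithms/hired/bin_array.py | solution
-- ===== SOURCE A (Python) =====
-- def solution(arr):
--     def get_size(index: int) -> int:
--         memo = dict()
--         stack = [index]
--         while stack:
--             i = stack[-1]
--             if i >= len(arr) or arr[i] == -1:
--                 memo[i] = 0
--                 stack.pop()
--             else:
--                 left = 2 * i + 1  # could be pushed into call stack
--                 right = 2 * i + 2
--                 if right not in memo:
--                     stack.append(right)
--
--                 if left not in memo:
--                     stack.append(left)
--
--                 if left in memo and right in memo:
--                     memo[i] = memo[left] + memo[right] + arr[i]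
--                     stack.pop()
--
--         return memo[index]
--
--     left_size = get_size(1)
--     right_size = get_size(2)
--     if left_size > right_size:
--         return 'Left'
--     elif right_size > left_size:
--         return 'Right'
--     else:
--         return ''
-- ===== SOURCE B (Python) =====
-- def solution(arr):
--     def get_size(index):
--         if index >= len(arr) or arr[index] == -1:
--             return 0
--         return arr[index] + get_size(2 * index + 1) + get_size(2 * index + 2)
--
--     left_size = get_size(1)
--     right_size = get_size(2)
--     if left_size > right_size:
--         return 'Left'
--     if right_size > left_size:
--         return 'Right'
--     return ''
-- ===== Notes on version B (the rewrite author's own statement) =====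
-- stated objective: simpler
-- what changed: The explicit stack + memo-dict simulation of post-order DFS is replaced by a direct recursive subtree-sum helper (tree depth is only logarithmic in the array length, so the recursion is shallow).
import Mathlib
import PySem

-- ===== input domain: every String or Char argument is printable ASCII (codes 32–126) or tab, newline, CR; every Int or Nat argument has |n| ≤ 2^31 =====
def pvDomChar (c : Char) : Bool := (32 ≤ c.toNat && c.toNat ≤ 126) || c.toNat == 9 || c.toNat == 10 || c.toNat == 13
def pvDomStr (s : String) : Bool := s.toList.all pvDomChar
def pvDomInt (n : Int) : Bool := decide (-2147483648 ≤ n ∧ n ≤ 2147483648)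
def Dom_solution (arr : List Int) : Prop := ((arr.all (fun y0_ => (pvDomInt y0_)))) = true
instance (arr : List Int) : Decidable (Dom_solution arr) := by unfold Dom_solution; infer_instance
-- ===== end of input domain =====

-- B replaces A's explicit stack+memo DFS loop by a direct recursive subtree-sum helper (simpler); same return value.

-- ===== PORT A =====
-- A's while-loop over (stack, memo), one fuel unit per iteration; the stack is kept head-as-top
-- (Python appends/pops at the END and reads stack[-1]).  The fuel 3^(len+2) is proved sufficient
-- below (lemma processOne), so the `none` branch of the match is never taken for the start indices 1, 2.
-- arr[i] is read only when i < len(arr), so List.getD is exact there; memo[left]/memo[right] are read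
-- only when present, so Dict.getD is exact there.
def loopA (arr : List Int) : Nat → List Nat → PySem.Dict Nat Int → Option (PySem.Dict Nat Int)
  | 0, _, _ => none
  | _ + 1, [], m => some m
  | f + 1, i :: rest, m =>
    if arr.length ≤ i ∨ arr.getD i 0 = -1 then
      loopA arr f rest (m.insert i 0)
    else if (m.get? (2 * i + 1)).isSome ∧ (m.get? (2 * i + 2)).isSome then
      loopA arr f rest
        (m.insert i (m.getD (2 * i + 1) 0 + m.getD (2 * i + 2) 0 + arr.getD i 0))
    else
      loopA arr f
        ((if (m.get? (2 * i + 1)).isSome then [] else [2 * i + 1]) ++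
         (if (m.get? (2 * i + 2)).isSome then [] else [2 * i + 2]) ++ i :: rest) m

def getSizeA (arr : List Int) (i : Nat) : Int :=
  match loopA arr (3 ^ (arr.length + 2)) [i] PySem.Dict.empty with
  | some m => m.getD i 0
  | none => 0

def solution (arr : List Int) : String :=
  let left_size := getSizeA arr 1
  let right_size := getSizeA arr 2
  if left_size > right_size then "Left"
  else if right_size > left_size then "Right"
  else ""

-- ===== PORT B =====
-- B's recursive get_size; indices are always ≥ 0 in both Pythons, so Nat indices are exact.
def gsize (arr : List Int) (i : Nat) : Int :=
  if h : arr.length ≤ i ∨ arr.getD i 0 = -1 then 0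
  else arr.getD i 0 + gsize arr (2 * i + 1) + gsize arr (2 * i + 2)
termination_by arr.length - i
decreasing_by all_goals (simp only [not_or, not_le] at h; omega)

def solution_alt (arr : List Int) : String :=
  let left_size := gsize arr 1
  let right_size := gsize arr 2
  if left_size > right_size then "Left"
  else if right_size > left_size then "Right"
  else ""

-- ===== PRECONDITION & SPEC =====
def Spec_solution (arr : List Int) (out : String) : Prop := out = solution_alt arr
instance (arr : List Int) (out : String) : Decidable (Spec_solution arr out) := by unfold Spec_solution; infer_instance

-- ===== CLAIM (what is proved, stated in full; the proofs are below) =====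
def Claim_equal_solution : Prop := ∀ (arr : List Int), Dom_solution arr → Spec_solution arr (solution arr)

-- ===== LEMMAS AND PROOFS =====

lemma gsize_leaf (arr : List Int) (i : Nat) (h : arr.length ≤ i ∨ arr.getD i 0 = -1) :
    gsize arr i = 0 := by rw [gsize]; exact dif_pos h

lemma gsize_node (arr : List Int) (i : Nat) (h : ¬(arr.length ≤ i ∨ arr.getD i 0 = -1)) :
    gsize arr i = arr.getD i 0 + gsize arr (2 * i + 1) + gsize arr (2 * i + 2) := by
  rw [gsize]; exact dif_neg h

lemma loopA_step (arr : List Int) (f : Nat) (i : Nat) (rest : List Nat)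
    (m : PySem.Dict Nat Int) :
    loopA arr (f + 1) (i :: rest) m =
      if arr.length ≤ i ∨ arr.getD i 0 = -1 then
        loopA arr f rest (m.insert i 0)
      else if (m.get? (2 * i + 1)).isSome ∧ (m.get? (2 * i + 2)).isSome then
        loopA arr f rest
          (m.insert i (m.getD (2 * i + 1) 0 + m.getD (2 * i + 2) 0 + arr.getD i 0))
      else
        loopA arr f
          ((if (m.get? (2 * i + 1)).isSome then [] else [2 * i + 1]) ++
           (if (m.get? (2 * i + 2)).isSome then [] else [2 * i + 2]) ++ i :: rest) m := rfl

lemma loopA_nil (arr : List Int) (f : Nat) (m : PySem.Dict Nat Int) :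
    loopA arr (f + 1) [] m = some m := rfl

/-- the memo invariant: every memoised value is the recursive subtree sum -/
def MemoInv (arr : List Int) (m : PySem.Dict Nat Int) : Prop :=
  ∀ j v, m.get? j = some v → v = gsize arr j

lemma processLeaf (arr : List Int) (i : Nat) (rest : List Nat) (m : PySem.Dict Nat Int)
    (hm : MemoInv arr m) (h1 : arr.length ≤ i ∨ arr.getD i 0 = -1) :
    ∃ (k : Nat) (m' : PySem.Dict Nat Int),
      k ≤ 3 ^ (arr.length + 2 - i) ∧ MemoInv arr m' ∧
      m'.get? i = some (gsize arr i) ∧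
      (∀ j : Nat, (m.get? j).isSome → (m'.get? j).isSome) ∧
      (∀ f : Nat, loopA arr (f + k) (i :: rest) m = loopA arr f rest m') := by
  refine ⟨1, m.insert i 0, Nat.one_le_pow _ _ (by norm_num), ?_, ?_, ?_, ?_⟩
  · intro j v hjv
    rw [PySem.Dict.get?_insert] at hjv
    split_ifs at hjv with hji
    · subst hji; rw [gsize_leaf arr j h1]; exact (Option.some_inj.mp hjv).symm
    · exact hm j v hjv
  · rw [gsize_leaf arr i h1]; exact PySem.Dict.get?_insert_self m _ _
  · intro j hj
    rw [PySem.Dict.get?_insert]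
    split_ifs with hji
    · rfl
    · exact hj
  · intro f
    rw [loopA_step, if_pos h1]

/-- Processing one stack entry: from state (i :: rest, m) the loop reaches (rest, m') in some
fixed number k ≤ 3^(len+2-i) of iterations, preserving the invariant, with i memoised. -/
lemma processOne (arr : List Int) : ∀ (n i : Nat), arr.length + 2 - i ≤ n →
    ∀ (rest : List Nat) (m : PySem.Dict Nat Int), MemoInv arr m →
    ∃ (k : Nat) (m' : PySem.Dict Nat Int),
      k ≤ 3 ^ (arr.length + 2 - i) ∧ MemoInv arr m' ∧
      m'.get? i = some (gsize arr i) ∧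
      (∀ j : Nat, (m.get? j).isSome → (m'.get? j).isSome) ∧
      (∀ f : Nat, loopA arr (f + k) (i :: rest) m = loopA arr f rest m') := by
  intro n
  induction n with
  | zero =>
    intro i hn rest m hm
    exact processLeaf arr i rest m hm (by left; omega)
  | succ n ih =>
    intro i hn rest m hm
    by_cases h1 : arr.length ≤ i ∨ arr.getD i 0 = -1
    · exact processLeaf arr i rest m hm h1
    · have hi : i < arr.length := by rcases not_or.mp h1 with ⟨h, -⟩; omega
      have hml : arr.length + 2 - (2 * i + 1) ≤ n := by omega
      have hmr : arr.length + 2 - (2 * i + 2) ≤ n := by omega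
      have e1 : 3 ^ (arr.length + 2 - (2 * i + 1)) ≤ 3 ^ (arr.length + 1 - i) :=
        Nat.pow_le_pow_right (by norm_num) (by omega)
      have e2 : 3 ^ (arr.length + 2 - (2 * i + 2)) ≤ 3 ^ (arr.length + 1 - i) :=
        Nat.pow_le_pow_right (by norm_num) (by omega)
      have hpow : 3 ^ (arr.length + 2 - i) = 3 ^ (arr.length + 1 - i) * 3 := by
        rw [← pow_succ]; congr 1; omega
      have h2p : 2 ≤ 3 ^ (arr.length + 1 - i) :=
        le_trans (by norm_num) (Nat.pow_le_pow_right (by norm_num) (show 1 ≤ arr.length + 1 - i by omega))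
      by_cases h2 : (m.get? (2 * i + 1)).isSome = true ∧ (m.get? (2 * i + 2)).isSome = true
      · -- both children already memoised: one iteration
        obtain ⟨hl, hr⟩ := h2
        obtain ⟨vl, hvl⟩ := Option.isSome_iff_exists.mp hl
        obtain ⟨vr, hvr⟩ := Option.isSome_iff_exists.mp hr
        have hv : m.getD (2 * i + 1) 0 + m.getD (2 * i + 2) 0 + arr.getD i 0 = gsize arr i := by
          rw [PySem.Dict.getD_of_get?_eq_some m 0 hvl, PySem.Dict.getD_of_get?_eq_some m 0 hvr,
            hm _ _ hvl, hm _ _ hvr, gsize_node arr i h1]; ring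
        refine ⟨1, m.insert i (m.getD (2 * i + 1) 0 + m.getD (2 * i + 2) 0 + arr.getD i 0),
          Nat.one_le_pow _ _ (by norm_num), ?_, ?_, ?_, ?_⟩
        · intro j v hjv
          rw [PySem.Dict.get?_insert] at hjv
          split_ifs at hjv with hji
          · subst hji; rw [← hv]; exact (Option.some_inj.mp hjv).symm
          · exact hm j v hjv
        · rw [← hv]; exact PySem.Dict.get?_insert_self m _ _
        · intro j hj
          rw [PySem.Dict.get?_insert]
          split_ifs with hji
          · rfl
          · exact hj
        · intro f
          rw [show f + 1 = f + 1 from rfl, loopA_step, if_neg h1, if_pos ⟨hl, hr⟩]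
      · -- at least one child missing: push it/them and recurse
        rcases Bool.eq_false_or_eq_true (m.get? (2 * i + 1)).isSome with hl | hl
        · -- left present, so right must be missing
          have hr : (m.get? (2 * i + 2)).isSome = false := by
            rcases Bool.eq_false_or_eq_true (m.get? (2 * i + 2)).isSome with hr | hr
            · exact absurd ⟨hl, hr⟩ h2
            · exact hr
          obtain ⟨k2, m1, hk2, hInv1, hget1, hmono1, hloop1⟩ :=
            ih (2 * i + 2) hmr (i :: rest) m hm
          have hl2 : (m1.get? (2 * i + 1)).isSome = true := hmono1 _ hl
          have hr2 : (m1.get? (2 * i + 2)).isSome = true := by rw [hget1]; rfl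
          obtain ⟨wl, hwl⟩ := Option.isSome_iff_exists.mp hl2
          obtain ⟨wr, hwr⟩ := Option.isSome_iff_exists.mp hr2
          have hv : m1.getD (2 * i + 1) 0 + m1.getD (2 * i + 2) 0 + arr.getD i 0 = gsize arr i := by
            rw [PySem.Dict.getD_of_get?_eq_some m1 0 hwl, PySem.Dict.getD_of_get?_eq_some m1 0 hwr,
              hInv1 _ _ hwl, hInv1 _ _ hwr, gsize_node arr i h1]; ring
          refine ⟨k2 + 2,
            m1.insert i (m1.getD (2 * i + 1) 0 + m1.getD (2 * i + 2) 0 + arr.getD i 0),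
            by omega, ?_, ?_, ?_, ?_⟩
          · intro j v hjv
            rw [PySem.Dict.get?_insert] at hjv
            split_ifs at hjv with hji
            · subst hji; rw [← hv]; exact (Option.some_inj.mp hjv).symm
            · exact hInv1 j v hjv
          · rw [← hv]; exact PySem.Dict.get?_insert_self m1 _ _
          · intro j hj
            rw [PySem.Dict.get?_insert]
            split_ifs with hji
            · rfl
            · exact hmono1 _ hj
          · intro f
            have e : f + (k2 + 2) = (f + 1 + k2) + 1 := by omega
            rw [e, loopA_step, if_neg h1, if_neg h2]
            simp [hl, hr]
            rw [hloop1 (f + 1), loopA_step, if_neg h1, if_pos ⟨hl2, hr2⟩, List.getD_eq_getElem?_getD]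
        · -- left missing
          rcases Bool.eq_false_or_eq_true (m.get? (2 * i + 2)).isSome with hr | hr
          · -- only left missing
            obtain ⟨k1, m1, hk1, hInv1, hget1, hmono1, hloop1⟩ :=
              ih (2 * i + 1) hml (i :: rest) m hm
            have hl2 : (m1.get? (2 * i + 1)).isSome = true := by rw [hget1]; rfl
            have hr2 : (m1.get? (2 * i + 2)).isSome = true := hmono1 _ hr
            obtain ⟨wl, hwl⟩ := Option.isSome_iff_exists.mp hl2
            obtain ⟨wr, hwr⟩ := Option.isSome_iff_exists.mp hr2
            have hv : m1.getD (2 * i + 1) 0 + m1.getD (2 * i + 2) 0 + arr.getD i 0 = gsize arr i := by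
              rw [PySem.Dict.getD_of_get?_eq_some m1 0 hwl, PySem.Dict.getD_of_get?_eq_some m1 0 hwr,
                hInv1 _ _ hwl, hInv1 _ _ hwr, gsize_node arr i h1]; ring
            refine ⟨k1 + 2,
              m1.insert i (m1.getD (2 * i + 1) 0 + m1.getD (2 * i + 2) 0 + arr.getD i 0),
              by omega, ?_, ?_, ?_, ?_⟩
            · intro j v hjv
              rw [PySem.Dict.get?_insert] at hjv
              split_ifs at hjv with hji
              · subst hji; rw [← hv]; exact (Option.some_inj.mp hjv).symm
              · exact hInv1 j v hjv
            · rw [← hv]; exact PySem.Dict.get?_insert_self m1 _ _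
            · intro j hj
              rw [PySem.Dict.get?_insert]
              split_ifs with hji
              · rfl
              · exact hmono1 _ hj
            · intro f
              have e : f + (k1 + 2) = (f + 1 + k1) + 1 := by omega
              rw [e, loopA_step, if_neg h1, if_neg h2]
              simp [hl, hr]
              rw [hloop1 (f + 1), loopA_step, if_neg h1, if_pos ⟨hl2, hr2⟩, List.getD_eq_getElem?_getD]
          · -- both missing
            obtain ⟨k1, m1, hk1, hInv1, hget1, hmono1, hloop1⟩ :=
              ih (2 * i + 1) hml ((2 * i + 2) :: i :: rest) m hm
            obtain ⟨k2, m2, hk2, hInv2, hget2, hmono2, hloop2⟩ :=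
              ih (2 * i + 2) hmr (i :: rest) m1 hInv1
            have hl2 : (m2.get? (2 * i + 1)).isSome = true :=
              hmono2 _ (by rw [hget1]; rfl)
            have hr2 : (m2.get? (2 * i + 2)).isSome = true := by rw [hget2]; rfl
            obtain ⟨wl, hwl⟩ := Option.isSome_iff_exists.mp hl2
            obtain ⟨wr, hwr⟩ := Option.isSome_iff_exists.mp hr2
            have hv : m2.getD (2 * i + 1) 0 + m2.getD (2 * i + 2) 0 + arr.getD i 0 = gsize arr i := by
              rw [PySem.Dict.getD_of_get?_eq_some m2 0 hwl, PySem.Dict.getD_of_get?_eq_some m2 0 hwr,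
                hInv2 _ _ hwl, hInv2 _ _ hwr, gsize_node arr i h1]; ring
            refine ⟨k1 + k2 + 2,
              m2.insert i (m2.getD (2 * i + 1) 0 + m2.getD (2 * i + 2) 0 + arr.getD i 0),
              by omega, ?_, ?_, ?_, ?_⟩
            · intro j v hjv
              rw [PySem.Dict.get?_insert] at hjv
              split_ifs at hjv with hji
              · subst hji; rw [← hv]; exact (Option.some_inj.mp hjv).symm
              · exact hInv2 j v hjv
            · rw [← hv]; exact PySem.Dict.get?_insert_self m2 _ _
            · intro j hj
              rw [PySem.Dict.get?_insert]
              split_ifs with hji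
              · rfl
              · exact hmono2 _ (hmono1 _ hj)
            · intro f
              have e : f + (k1 + k2 + 2) = (f + 1 + k2 + k1) + 1 := by omega
              rw [e, loopA_step, if_neg h1, if_neg h2]
              simp [hl, hr]
              rw [hloop1 (f + 1 + k2), hloop2 (f + 1), loopA_step, if_neg h1,
                if_pos ⟨hl2, hr2⟩, List.getD_eq_getElem?_getD]

lemma getSizeA_eq (arr : List Int) (i : Nat) (h1 : 1 ≤ i) :
    getSizeA arr i = gsize arr i := by
  obtain ⟨k, m', hk, hInv, hget, -, hloop⟩ :=
    processOne arr (arr.length + 2 - i) i le_rfl [] PySem.Dict.empty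
      (by intro j v h; simp [PySem.Dict.get?_empty] at h)
  have hkb : k ≤ 3 ^ (arr.length + 1) :=
    le_trans hk (Nat.pow_le_pow_right (by norm_num) (by omega))
  have h3 : 3 ^ (arr.length + 1) < 3 ^ (arr.length + 2) :=
    Nat.pow_lt_pow_right (by norm_num) (by omega)
  have hF : 3 ^ (arr.length + 2) = (3 ^ (arr.length + 2) - k - 1 + 1) + k := by omega
  unfold getSizeA
  rw [hF, hloop, loopA_nil]
  exact PySem.Dict.getD_of_get?_eq_some m' 0 hget

-- ===== VERDICT (by name: the statement is the Claim_ definition above) =====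
theorem solution_spec : Claim_equal_solution := by
  intro arr _
  unfold Spec_solution solution solution_alt
  rw [getSizeA_eq arr 1 (by omega), getSizeA_eq arr 2 (by omega)]
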